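-- pv_equiv track=rewrite | github.com/rlrs/dfm-sdg | sdg/packs/verifiable_reasoning/lightuppuzzle.py | _numbered_walls_feasible
-- ===== SOURCE A (Python) =====
-- def _numbered_walls_feasible(
--     board_grid: tuple[str, ...],
--     statuses: dict[tuple[int, int], str],
-- ) -> bool:
--     rows = len(board_grid)
--     cols = len(board_grid[0])
--     for row in range(rows):
--         for col in range(cols):
--             clue = board_grid[row][col]
--             if not clue.isdigit():
--                 continue
--             adjacent = [
--                 pos
--                 for pos in _neighbors(row, col, rows, cols)
--                 if pos in statuses
--             ]
--             lamp_count = sum(statuses[pos] == "lamp" for pos in adjacent)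
--             unknown_count = sum(statuses[pos] == "unknown" for pos in adjacent)
--             required = int(clue)
--             if lamp_count > required:
--                 return False
--             if lamp_count + unknown_count < required:
--                 return False
--     return True
--
-- def _neighbors(row: int, col: int, rows: int, cols: int) -> tuple[tuple[int, int], ...]:
--     neighbors: list[tuple[int, int]] = []
--     for next_row, next_col in (
--         (row - 1, col),
--         (row + 1, col),
--         (row, col - 1),
--         (row, col + 1),
--     ):
--         if 0 <= next_row < rows and 0 <= next_col < cols:
--             neighbors.append((next_row, next_col))
--     return tuple(neighbors)
-- ===== SOURCE B (Python) =====
-- def _numbered_walls_feasible(board_grid, statuses):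
--     rows = len(board_grid)
--     cols = len(board_grid[0])
--     walls = {}
--     for r in range(rows):
--         for c in range(cols):
--             if board_grid[r][c].isdigit():
--                 walls[(r, c)] = [int(board_grid[r][c]), 0, 0]
--     for (r, c), status in statuses.items():
--         if status == "lamp":
--             idx = 1
--         elif status == "unknown":
--             idx = 2
--         else:
--             continue
--         if not (0 <= r < rows and 0 <= c < cols):
--             continue
--         for pos in ((r - 1, c), (r + 1, c), (r, c - 1), (r, c + 1)):
--             entry = walls.get(pos)
--             if entry is not None:
--                 entry[idx] += 1
--     for req, lamp, unknown in walls.values():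
--         if lamp > req or lamp + unknown < req:
--             return False
--     return True
-- ===== Notes on version B (the rewrite author's own statement) =====
-- stated objective: alternative
-- what changed: B inverts A's per-wall neighbour gather (for each numbered wall, scan its four neighbours and look each up in the status dict) into a scatter pass: it first collects every numbered wall into a dict with zeroed lamp/unknown counters, then walks statuses.items() once adding each in-grid lamp/unknown cell to its neighbouring walls' counters, and finally checks every wall's tallies.
-- outside the precondition, e.g. on _numbered_walls_feasible(('2.', '.'), {}): A returns False, B raises IndexError
import Mathlib
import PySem

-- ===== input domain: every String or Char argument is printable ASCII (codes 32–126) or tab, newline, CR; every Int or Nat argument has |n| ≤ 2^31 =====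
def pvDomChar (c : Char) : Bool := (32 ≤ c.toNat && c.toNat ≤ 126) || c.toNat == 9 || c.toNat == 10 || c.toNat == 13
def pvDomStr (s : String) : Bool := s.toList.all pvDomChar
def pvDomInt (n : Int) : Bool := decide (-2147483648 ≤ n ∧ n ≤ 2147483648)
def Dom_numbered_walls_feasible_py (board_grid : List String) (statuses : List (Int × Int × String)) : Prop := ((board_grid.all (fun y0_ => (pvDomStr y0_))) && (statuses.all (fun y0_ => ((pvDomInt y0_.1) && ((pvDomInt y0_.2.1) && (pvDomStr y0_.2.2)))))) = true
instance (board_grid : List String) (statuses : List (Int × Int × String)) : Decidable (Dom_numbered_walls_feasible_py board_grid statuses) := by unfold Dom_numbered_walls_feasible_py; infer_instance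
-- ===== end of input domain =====

-- B replaces A's per-wall gather (for every numbered wall, scan its neighbours and look each up
-- in the status dict) by a one-pass scatter: collect the walls once, then walk statuses.items()
-- adding each lamp/unknown cell to its neighbouring walls' counters; objective: alternative decomposition.

-- ===== PORT A =====
-- in-bounds test '0 <= next_row < rows and 0 <= next_col < cols'
def pvInb (rows cols : Int) (p : Int × Int) : Bool :=
  decide (0 ≤ p.1) && decide (p.1 < rows) && decide (0 ≤ p.2) && decide (p.2 < cols)

-- _neighbors: append each in-bounds candidate, in order
def pvNeighbors (row col rows cols : Int) : List (Int × Int) :=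
  [(row - 1, col), (row + 1, col), (row, col - 1), (row, col + 1)].foldl
    (fun acc p => if pvInb rows cols p then acc ++ [p] else acc) []

-- the body of A's double loop for one cell (row, col); False ⇒ A returns False
def pvCellOk (d : PySem.Dict (Int × Int) String) (rows cols : Int) (board_grid : List String)
    (r c : Int) : Bool :=
  match PySem.List.pyGet? board_grid r with
  | none => false   -- IndexError (excluded by Pre_)
  | some s =>
    match PySem.Str.pyGet? s c with
    | none => false -- IndexError (excluded by Pre_)
    | some clue =>
      if PySem.Chars.isdigit clue then
        let adjacent := (pvNeighbors r c rows cols).filter (fun pos => d.contains pos)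
        let lamp : Int := (adjacent.map (fun pos => if d.getD pos "" == "lamp" then (1 : Int) else 0)).sum
        let unknown : Int := (adjacent.map (fun pos => if d.getD pos "" == "unknown" then (1 : Int) else 0)).sum
        match PySem.Int.ofStr? (String.mk [clue]) with
        | none => false -- unreachable for a digit
        | some required =>
          if lamp > required then false
          else if lamp + unknown < required then false
          else true
      else true

def numbered_walls_feasible_py (board_grid : List String) (statuses : List (Int × Int × String)) : Bool :=
  match PySem.List.pyGet? board_grid 0 with
  | none => false   -- IndexError on the empty grid (excluded by Pre_)
  | some row0 =>
    let rows : Int := board_grid.length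
    let cols : Int := PySem.Str.len row0
    let d : PySem.Dict (Int × Int) String := PySem.Dict.mk (statuses.map (fun e => ((e.1, e.2.1), e.2.2)))
    (PySem.List.pyRange 0 rows 1).all fun r =>
      (PySem.List.pyRange 0 cols 1).all fun c =>
        pvCellOk d rows cols board_grid r c

-- ===== PORT B =====
-- board_grid[r][c], total form (none only outside Pre_)
def pvCharAt (board_grid : List String) (r c : Int) : Option Char :=
  match PySem.List.pyGet? board_grid r with
  | none => none
  | some s => PySem.Str.pyGet? s c

def pvDigitAt (board_grid : List String) (r c : Int) : Bool :=
  (pvCharAt board_grid r c).elim false PySem.Chars.isdigit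

def pvClue (board_grid : List String) (r c : Int) : Int :=
  ((pvCharAt board_grid r c).elim none (fun ch => PySem.Int.ofStr? (String.mk [ch]))).getD 0

-- first pass of B: walls[(r,c)] = [int(ch), 0, 0] for every digit cell
def pvRegister (board_grid : List String) (rows cols : Int) : PySem.Dict (Int × Int) (Int × Int × Int) :=
  (PySem.List.pyRange 0 rows 1).foldl
    (fun w r =>
      (PySem.List.pyRange 0 cols 1).foldl
        (fun w c =>
          if pvDigitAt board_grid r c then w.insert (r, c) (pvClue board_grid r c, 0, 0) else w)
        w)
    PySem.Dict.empty

-- entry = walls.get(pos); if entry is not None: entry[idx] += 1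
def pvTouch (w : PySem.Dict (Int × Int) (Int × Int × Int)) (pos : Int × Int) (isLamp : Bool) :
    PySem.Dict (Int × Int) (Int × Int × Int) :=
  match w.get? pos with
  | none => w
  | some e => w.insert pos (if isLamp then (e.1, e.2.1 + 1, e.2.2) else (e.1, e.2.1, e.2.2 + 1))

-- second pass of B: scatter each lamp/unknown status cell into its neighbouring walls
def pvScatter (rows cols : Int) (statuses : List (Int × Int × String))
    (w : PySem.Dict (Int × Int) (Int × Int × Int)) : PySem.Dict (Int × Int) (Int × Int × Int) :=
  statuses.foldl
    (fun w e =>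
      if e.2.2 == "lamp" || e.2.2 == "unknown" then
        if pvInb rows cols (e.1, e.2.1) then
          [(e.1 - 1, e.2.1), (e.1 + 1, e.2.1), (e.1, e.2.1 - 1), (e.1, e.2.1 + 1)].foldl
            (fun w pos => pvTouch w pos (e.2.2 == "lamp")) w
        else w
      else w)
    w

def numbered_walls_feasible_py_alt (board_grid : List String) (statuses : List (Int × Int × String)) : Bool :=
  match PySem.List.pyGet? board_grid 0 with
  | none => false   -- IndexError on the empty grid (excluded by Pre_)
  | some row0 =>
    let rows : Int := board_grid.length
    let cols : Int := PySem.Str.len row0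
    let walls := pvScatter rows cols statuses (pvRegister board_grid rows cols)
    walls.values.all fun e => !(decide (e.2.1 > e.1) || decide (e.2.1 + e.2.2 < e.1))

-- ===== PRECONDITION & SPEC =====
-- Pre_ excludes (a) the empty grid and ragged grids whose later row is shorter than the first
-- (A raises IndexError there), and (b) statuses lists with duplicate (row, col) keys, which do
-- not represent a Python dict (A's parameter is a dict, so such lists are ambiguous encodings).
def Pre_numbered_walls_feasible_py (board_grid : List String) (statuses : List (Int × Int × String)) : Prop :=
  board_grid ≠ [] ∧
  (∀ s ∈ board_grid, (board_grid.headI).length ≤ s.length) ∧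
  (statuses.map (fun e => (e.1, e.2.1))).Nodup
instance (board_grid : List String) (statuses : List (Int × Int × String)) : Decidable (Pre_numbered_walls_feasible_py board_grid statuses) := by unfold Pre_numbered_walls_feasible_py; infer_instance

def pvWitness_numbered_walls_feasible_py : List String × (List (Int × Int × String)) :=
  (["1#", ".2"], [(0, 1, "lamp"), (1, 0, "unknown"), (1, 1, "empty")])

def Spec_numbered_walls_feasible_py (board_grid : List String) (statuses : List (Int × Int × String)) (out : Bool) : Prop := out = numbered_walls_feasible_py_alt board_grid statuses
instance (board_grid : List String) (statuses : List (Int × Int × String)) (out : Bool) : Decidable (Spec_numbered_walls_feasible_py board_grid statuses out) := by unfold Spec_numbered_walls_feasible_py; infer_instance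

-- ===== CLAIM (what is proved, stated in full; the proofs are below) =====
def Claim_equal_numbered_walls_feasible_py : Prop := ∀ (board_grid : List String) (statuses : List (Int × Int × String)), Dom_numbered_walls_feasible_py board_grid statuses → Pre_numbered_walls_feasible_py board_grid statuses → Spec_numbered_walls_feasible_py board_grid statuses (numbered_walls_feasible_py board_grid statuses)

-- ===== LEMMAS AND PROOFS =====

def pvNbrs4 (k : Int × Int) : List (Int × Int) :=
  [(k.1 - 1, k.2), (k.1 + 1, k.2), (k.1, k.2 - 1), (k.1, k.2 + 1)]

lemma pv_foldl_flatMap {α β σ : Type} (l : List α) (g : α → List β) (f : σ → β → σ) (i : σ) :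
    (l.flatMap g).foldl f i = l.foldl (fun acc r => (g r).foldl f acc) i := by
  induction l generalizing i with
  | nil => rfl
  | cons a l ih => simp [List.flatMap_cons, List.foldl_append, ih]

lemma pv_get?_foldl_condinsert {ν : Type} (xs : List (Int × Int)) (P : (Int × Int) → Bool)
    (v : (Int × Int) → ν) (w : PySem.Dict (Int × Int) ν) (p : Int × Int) :
    (xs.foldl (fun w a => if P a then w.insert a (v a) else w) w).get? p
      = if p ∈ xs ∧ P p = true then some (v p) else w.get? p := by
  induction xs generalizing w with
  | nil => simp
  | cons a xs ih =>
    simp only [List.foldl_cons]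
    rw [ih]
    by_cases hp : p ∈ xs ∧ P p = true
    · simp [hp, List.mem_cons, hp.1]
    · rw [if_neg hp]
      by_cases hPa : P a = true
      · rw [if_pos hPa, PySem.Dict.get?_insert]
        by_cases hpa : p = a
        · subst hpa; simp [hPa]
        · simp only [if_neg hpa]
          rw [if_neg]
          rintro ⟨hm, hPp⟩
          rcases List.mem_cons.mp hm with h | h
          · exact hpa h
          · exact hp ⟨h, hPp⟩
      · rw [if_neg hPa, if_neg]
        rintro ⟨hm, hPp⟩
        rcases List.mem_cons.mp hm with h | h
        · subst h; exact hPa hPp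
        · exact hp ⟨h, hPp⟩

lemma pv_nodup_keys_condinsert {ν : Type} (xs : List (Int × Int)) (P : (Int × Int) → Bool)
    (v : (Int × Int) → ν) (w : PySem.Dict (Int × Int) ν) (hw : w.keys.Nodup) :
    (xs.foldl (fun w a => if P a then w.insert a (v a) else w) w).keys.Nodup := by
  induction xs generalizing w with
  | nil => exact hw
  | cons a xs ih =>
    simp only [List.foldl_cons]
    by_cases hPa : P a = true
    · rw [if_pos hPa]; exact ih _ (PySem.Dict.nodup_keys_insert _ _ _ hw)
    · rw [if_neg hPa]; exact ih _ hw

lemma pv_countP_or {α : Type} (l : List α) (p q : α → Bool)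
    (h : ∀ a ∈ l, ¬(p a = true ∧ q a = true)) :
    l.countP (fun a => p a || q a) = l.countP p + l.countP q := by
  induction l with
  | nil => simp
  | cons a l ih =>
    simp only [List.countP_cons]
    rw [ih (fun b hb => h b (List.mem_cons_of_mem _ hb))]
    by_cases hp : p a = true
    · have hq : q a = false := by
        cases hq : q a
        · rfl
        · exact absurd ⟨hp, hq⟩ (h a (List.mem_cons_self))
      simp [hp, hq]; omega
    · simp only [Bool.not_eq_true] at hp
      simp [hp]; omega

lemma pv_countP_key (ml : List ((Int × Int) × String)) (hK : (ml.map Prod.fst).Nodup)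
    (q : Int × Int) (g : (Int × Int) → Bool) (tgt : String) :
    ml.countP (fun kv => g kv.1 && (kv.2 == tgt) && decide (kv.1 = q))
      = if g q && ((PySem.Dict.mk ml).get? q == some tgt) then 1 else 0 := by
  induction ml with
  | nil => simp [PySem.Dict.get?]
  | cons kv ml ih =>
    rw [List.map_cons] at hK
    rcases List.nodup_cons.mp hK with ⟨hk, hnd⟩
    rw [List.countP_cons, PySem.Dict.get?_mk_cons]
    by_cases hkq : kv.1 = q
    · have hz : ml.countP (fun kv' => g kv'.1 && (kv'.2 == tgt) && decide (kv'.1 = q)) = 0 := by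
        rw [List.countP_eq_zero]
        intro b hb
        simp only [Bool.and_eq_true, decide_eq_true_eq, not_and]
        rintro - hbq
        exact absurd (hkq ▸ hbq ▸ List.mem_map_of_mem hb) hk
      rw [hz]
      subst hkq
      by_cases hg : g kv.1 = true <;> by_cases ht : kv.2 = tgt <;> simp [hg, ht]
    · have hb : (kv.1 == q) = false := by simpa using hkq
      rw [ih hnd]
      simp [hkq, hb]

lemma pv_countP_flip (ml : List ((Int × Int) × String)) (hK : (ml.map Prod.fst).Nodup)
    (ns : List (Int × Int)) (hns : ns.Nodup) (g : (Int × Int) → Bool) (tgt : String) :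
    ns.countP (fun q => g q && ((PySem.Dict.mk ml).get? q == some tgt))
      = ml.countP (fun kv => g kv.1 && (kv.2 == tgt) && decide (kv.1 ∈ ns)) := by
  induction ns with
  | nil => simp
  | cons q ns ih =>
    rcases List.nodup_cons.mp hns with ⟨hq, hnd⟩
    rw [List.countP_cons, ih hnd]
    have hsplit : ml.countP (fun kv => g kv.1 && (kv.2 == tgt) && decide (kv.1 ∈ q :: ns))
        = ml.countP (fun kv => g kv.1 && (kv.2 == tgt) && decide (kv.1 = q))
          + ml.countP (fun kv => g kv.1 && (kv.2 == tgt) && decide (kv.1 ∈ ns)) := by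
      rw [← pv_countP_or]
      · apply List.countP_congr
        intro kv _
        by_cases h1 : g kv.1 && (kv.2 == tgt) = true
        · simp [List.mem_cons, h1, Bool.and_or_distrib_left]
        · simp only [Bool.and_eq_true] at h1
          simp only [Bool.and_assoc]
          cases hg : g kv.1 <;> cases ht : kv.2 == tgt <;> simp_all
      · rintro kv - ⟨h1, h2⟩
        simp only [Bool.and_eq_true, decide_eq_true_eq] at h1 h2
        exact hq (h1.2 ▸ h2.2)
    rw [hsplit, pv_countP_key ml hK q g tgt]
    omega

def pvCL (rows cols : Int) (e : Int × Int × String) (p : Int × Int) : Int :=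
  if e.2.2 = "lamp" ∧ pvInb rows cols (e.1, e.2.1) = true ∧ p ∈ pvNbrs4 (e.1, e.2.1) then 1 else 0

def pvCU (rows cols : Int) (e : Int × Int × String) (p : Int × Int) : Int :=
  if e.2.2 = "unknown" ∧ pvInb rows cols (e.1, e.2.1) = true ∧ p ∈ pvNbrs4 (e.1, e.2.1) then 1 else 0

lemma pv_touch_get? (w : PySem.Dict (Int × Int) (Int × Int × Int)) (pos : Int × Int)
    (b : Bool) (q : Int × Int) :
    (pvTouch w pos b).get? q
      = if q = pos then
          (w.get? pos).map (fun e => if b then (e.1, e.2.1 + 1, e.2.2) else (e.1, e.2.1, e.2.2 + 1))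
        else w.get? q := by
  by_cases h : q = pos
  · subst h
    unfold pvTouch
    cases hw : w.get? q with
    | none => simp [hw]
    | some e => rw [PySem.Dict.get?_insert]; simp [hw]
  · unfold pvTouch
    cases hw : w.get? pos with
    | none => simp [h]
    | some e => rw [PySem.Dict.get?_insert]; simp [h]

lemma pv_scatter_cons (rows cols : Int) (e : Int × Int × String) (l : List (Int × Int × String))
    (w : PySem.Dict (Int × Int) (Int × Int × Int)) :
    pvScatter rows cols (e :: l) w = pvScatter rows cols l
      (if e.2.2 == "lamp" || e.2.2 == "unknown" then
        if pvInb rows cols (e.1, e.2.1) then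
          [(e.1 - 1, e.2.1), (e.1 + 1, e.2.1), (e.1, e.2.1 - 1), (e.1, e.2.1 + 1)].foldl
            (fun w pos => pvTouch w pos (e.2.2 == "lamp")) w
        else w
      else w) := rfl

lemma pv_step_get? (rows cols : Int) (e : Int × Int × String)
    (w : PySem.Dict (Int × Int) (Int × Int × Int)) (p : Int × Int) :
    (if e.2.2 == "lamp" || e.2.2 == "unknown" then
        if pvInb rows cols (e.1, e.2.1) then
          [(e.1 - 1, e.2.1), (e.1 + 1, e.2.1), (e.1, e.2.1 - 1), (e.1, e.2.1 + 1)].foldl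
            (fun w pos => pvTouch w pos (e.2.2 == "lamp")) w
        else w
      else w).get? p
      = (w.get? p).map (fun t => (t.1, t.2.1 + pvCL rows cols e p, t.2.2 + pvCU rows cols e p)) := by
  have d12 : ((e.1 : Int) - 1, e.2.1) ≠ (e.1 + 1, e.2.1) := by intro h; rw [Prod.ext_iff] at h; omega
  have d13 : ((e.1 : Int) - 1, e.2.1) ≠ (e.1, e.2.1 - 1) := by intro h; rw [Prod.ext_iff] at h; omega
  have d14 : ((e.1 : Int) - 1, e.2.1) ≠ (e.1, e.2.1 + 1) := by intro h; rw [Prod.ext_iff] at h; omega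
  have d23 : ((e.1 : Int) + 1, e.2.1) ≠ (e.1, e.2.1 - 1) := by intro h; rw [Prod.ext_iff] at h; omega
  have d24 : ((e.1 : Int) + 1, e.2.1) ≠ (e.1, e.2.1 + 1) := by intro h; rw [Prod.ext_iff] at h; omega
  have d34 : ((e.1 : Int), e.2.1 - 1) ≠ (e.1, e.2.1 + 1) := by intro h; rw [Prod.ext_iff] at h; omega
  by_cases hl : e.2.2 = "lamp"
  · have hb : (e.2.2 == "lamp") = true := by simp [hl]
    rw [hb]
    simp only [Bool.true_or, if_true]
    by_cases hin : pvInb rows cols (e.1, e.2.1) = true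
    · rw [if_pos hin]
      simp only [List.foldl_cons, List.foldl_nil, pv_touch_get?, hb]
      by_cases h1 : p = ((e.1 : Int) - 1, e.2.1) <;>
        by_cases h2 : p = ((e.1 : Int) + 1, e.2.1) <;>
          by_cases h3 : p = ((e.1 : Int), e.2.1 - 1) <;>
            by_cases h4 : p = ((e.1 : Int), e.2.1 + 1) <;>
              simp_all [pvCL, pvCU, pvNbrs4, d12, d13, d14, d23, d24, d34,
                Ne.symm d12, Ne.symm d13, Ne.symm d14, Ne.symm d23, Ne.symm d24, Ne.symm d34] <;>
              (try (cases w.get? p <;> simp))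
    · rw [if_neg hin]
      simp [pvCL, pvCU, hl, hin]
      try (cases w.get? p <;> simp)
  · by_cases hu : e.2.2 = "unknown"
    · have hb : (e.2.2 == "lamp") = false := by simp [hl]
      have hb' : (e.2.2 == "unknown") = true := by simp [hu]
      rw [hb, hb']
      simp only [Bool.false_or, if_true]
      by_cases hin : pvInb rows cols (e.1, e.2.1) = true
      · rw [if_pos hin]
        simp only [List.foldl_cons, List.foldl_nil, pv_touch_get?, hb]
        by_cases h1 : p = ((e.1 : Int) - 1, e.2.1) <;>
          by_cases h2 : p = ((e.1 : Int) + 1, e.2.1) <;>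
            by_cases h3 : p = ((e.1 : Int), e.2.1 - 1) <;>
              by_cases h4 : p = ((e.1 : Int), e.2.1 + 1) <;>
                simp_all [pvCL, pvCU, pvNbrs4, d12, d13, d14, d23, d24, d34,
                  Ne.symm d12, Ne.symm d13, Ne.symm d14, Ne.symm d23, Ne.symm d24, Ne.symm d34] <;>
                (try (cases w.get? p <;> simp))
      · rw [if_neg hin]
        simp [pvCL, pvCU, hu, hin]
        try (cases w.get? p <;> simp)
    · have hb : (e.2.2 == "lamp") = false := by simp [hl]
      have hb' : (e.2.2 == "unknown") = false := by simp [hu]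
      rw [hb, hb']
      simp [pvCL, pvCU, hl, hu]
      try (cases w.get? p <;> simp)

lemma pv_scatter_get? (rows cols : Int) (l : List (Int × Int × String))
    (w : PySem.Dict (Int × Int) (Int × Int × Int)) (p : Int × Int) :
    (pvScatter rows cols l w).get? p
      = (w.get? p).map (fun t =>
          (t.1, t.2.1 + (l.map (fun e => pvCL rows cols e p)).sum,
                t.2.2 + (l.map (fun e => pvCU rows cols e p)).sum)) := by
  induction l generalizing w with
  | nil =>
    show w.get? p = _
    cases w.get? p <;> simp
  | cons e l ih =>
    rw [pv_scatter_cons, ih, pv_step_get?]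
    cases w.get? p with
    | none => simp
    | some t =>
      simp only [Option.map_some, List.map_cons, List.sum_cons]
      refine congrArg some ?_
      refine Prod.ext rfl (Prod.ext ?_ ?_) <;> simp <;> ring

lemma pv_nodup_keys_touch (w : PySem.Dict (Int × Int) (Int × Int × Int)) (pos : Int × Int)
    (b : Bool) (hw : w.keys.Nodup) : (pvTouch w pos b).keys.Nodup := by
  unfold pvTouch
  cases w.get? pos with
  | none => exact hw
  | some e => exact PySem.Dict.nodup_keys_insert _ _ _ hw

lemma pv_nodup_keys_scatter (rows cols : Int) (l : List (Int × Int × String))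
    (w : PySem.Dict (Int × Int) (Int × Int × Int)) (hw : w.keys.Nodup) :
    (pvScatter rows cols l w).keys.Nodup := by
  induction l generalizing w with
  | nil => exact hw
  | cons e l ih =>
    rw [pv_scatter_cons]
    apply ih
    split_ifs
    · simp only [List.foldl_cons, List.foldl_nil]
      exact pv_nodup_keys_touch _ _ _ (pv_nodup_keys_touch _ _ _
        (pv_nodup_keys_touch _ _ _ (pv_nodup_keys_touch _ _ _ hw)))
    · exact hw
    · exact hw

lemma pv_register_eq (board_grid : List String) (rows cols : Int) :
    pvRegister board_grid rows cols
      = ((PySem.List.pyRange 0 rows 1).flatMap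
          (fun r => (PySem.List.pyRange 0 cols 1).map (fun c => (r, c)))).foldl
          (fun w a =>
            if pvDigitAt board_grid a.1 a.2 then w.insert a (pvClue board_grid a.1 a.2, 0, 0) else w)
          PySem.Dict.empty := by
  rw [pv_foldl_flatMap]
  unfold pvRegister
  simp [List.foldl_map]

lemma pv_register_get? (board_grid : List String) (rows cols : Int) (p : Int × Int) :
    (pvRegister board_grid rows cols).get? p
      = if (0 ≤ p.1 ∧ p.1 < rows ∧ 0 ≤ p.2 ∧ p.2 < cols) ∧ pvDigitAt board_grid p.1 p.2 = true
        then some (pvClue board_grid p.1 p.2, 0, 0) else none := by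
  rw [pv_register_eq, pv_get?_foldl_condinsert]
  have hmem : p ∈ (PySem.List.pyRange 0 rows 1).flatMap
      (fun r => (PySem.List.pyRange 0 cols 1).map (fun c => (r, c)))
      ↔ (0 ≤ p.1 ∧ p.1 < rows ∧ 0 ≤ p.2 ∧ p.2 < cols) := by
    simp only [List.mem_flatMap, List.mem_map, PySem.List.mem_pyRange_one]
    constructor
    · rintro ⟨r, ⟨hr1, hr2⟩, c, ⟨hc1, hc2⟩, rfl⟩
      exact ⟨hr1, hr2, hc1, hc2⟩
    · rintro ⟨h1, h2, h3, h4⟩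
      exact ⟨p.1, ⟨h1, h2⟩, p.2, ⟨h3, h4⟩, rfl⟩
  rw [show (PySem.Dict.empty : PySem.Dict (Int × Int) (Int × Int × Int)).get? p = none from rfl]
  by_cases h : (0 ≤ p.1 ∧ p.1 < rows ∧ 0 ≤ p.2 ∧ p.2 < cols) ∧ pvDigitAt board_grid p.1 p.2 = true
  · rw [if_pos ⟨hmem.mpr h.1, h.2⟩, if_pos h]
  · rw [if_neg (fun hc => h ⟨hmem.mp hc.1, hc.2⟩), if_neg h]

lemma pv_nodup_keys_register (board_grid : List String) (rows cols : Int) :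
    (pvRegister board_grid rows cols).keys.Nodup := by
  rw [pv_register_eq]
  exact pv_nodup_keys_condinsert _ _ _ _ (by simp [PySem.Dict.empty, PySem.Dict.keys])

lemma pv_ofStr_digit (c : Char) (h : PySem.Chars.isdigit c = true) :
    PySem.Int.ofStr? (String.mk [c]) = some ((c.toNat : Int) - 48) := by
  simp only [PySem.Chars.isdigit, Bool.and_eq_true, decide_eq_true_eq] at h
  obtain ⟨h1, h2⟩ := h
  have hv1 : 48 ≤ c.val.toNat := by simpa [Char.le_def, UInt32.le_iff_toNat_le] using h1
  have hv2 : c.val.toNat ≤ 57 := by simpa [Char.le_def, UInt32.le_iff_toNat_le] using h2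
  have hcases : c = '0' ∨ c = '1' ∨ c = '2' ∨ c = '3' ∨ c = '4' ∨ c = '5' ∨ c = '6' ∨ c = '7' ∨ c = '8' ∨ c = '9' := by
    by_contra hc
    push_neg at hc
    obtain ⟨n0,n1,n2,n3,n4,n5,n6,n7,n8,n9⟩ := hc
    have e0 : c.val.toNat ≠ 48 := fun he => n0 (Char.ext (UInt32.toNat_inj.mp (by simpa using he)))
    have e1 : c.val.toNat ≠ 49 := fun he => n1 (Char.ext (UInt32.toNat_inj.mp (by simpa using he)))
    have e2 : c.val.toNat ≠ 50 := fun he => n2 (Char.ext (UInt32.toNat_inj.mp (by simpa using he)))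
    have e3 : c.val.toNat ≠ 51 := fun he => n3 (Char.ext (UInt32.toNat_inj.mp (by simpa using he)))
    have e4 : c.val.toNat ≠ 52 := fun he => n4 (Char.ext (UInt32.toNat_inj.mp (by simpa using he)))
    have e5 : c.val.toNat ≠ 53 := fun he => n5 (Char.ext (UInt32.toNat_inj.mp (by simpa using he)))
    have e6 : c.val.toNat ≠ 54 := fun he => n6 (Char.ext (UInt32.toNat_inj.mp (by simpa using he)))
    have e7 : c.val.toNat ≠ 55 := fun he => n7 (Char.ext (UInt32.toNat_inj.mp (by simpa using he)))
    have e8 : c.val.toNat ≠ 56 := fun he => n8 (Char.ext (UInt32.toNat_inj.mp (by simpa using he)))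
    have e9 : c.val.toNat ≠ 57 := fun he => n9 (Char.ext (UInt32.toNat_inj.mp (by simpa using he)))
    omega
  rcases hcases with rfl|rfl|rfl|rfl|rfl|rfl|rfl|rfl|rfl|rfl <;> decide



lemma pv_nbrs4_nodup (k : Int × Int) : (pvNbrs4 k).Nodup := by
  simp [pvNbrs4, Prod.ext_iff]
  omega

lemma pv_nbrs4_symm (p k : Int × Int) : p ∈ pvNbrs4 k ↔ k ∈ pvNbrs4 p := by
  simp [pvNbrs4, Prod.ext_iff]
  omega

lemma pv_neighbors_eq (r c rows cols : Int) :
    pvNeighbors r c rows cols = (pvNbrs4 (r, c)).filter (pvInb rows cols) := by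
  simp only [pvNeighbors, pvNbrs4, List.foldl_cons, List.foldl_nil, List.filter]
  split_ifs <;> simp_all

lemma pv_lookup_eq (d : PySem.Dict (Int × Int) String) (q : Int × Int) (tgt : String) :
    (d.contains q && (d.getD q "" == tgt)) = (d.get? q == some tgt) := by
  cases hq : d.get? q with
  | none =>
    have hc : d.contains q = false := by
      rw [PySem.Dict.contains_eq_isSome_get?, hq]; rfl
    simp [hc]
  | some v =>
    have hc : d.contains q = true := by
      rw [PySem.Dict.contains_eq_isSome_get?, hq]; rfl
    rw [PySem.Dict.getD_eq_get?_getD, hq]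
    simp [hc]

lemma pv_bool_eq (a b : Bool) (h : a = true ↔ b = true) : a = b := by
  cases a <;> cases b <;> simp_all

-- A's gather count of one target equals B's scatter contribution sum, given unique keys
lemma pv_count_eq (rows cols : Int) (l : List (Int × Int × String))
    (hK : ((l.map (fun e => ((e.1, e.2.1), e.2.2))).map Prod.fst).Nodup)
    (r c : Int) (tgt : String)
    (cf : Int → Int → (Int × Int × String) → (Int × Int) → Int)
    (hcf : cf = pvCL ∧ tgt = "lamp" ∨ cf = pvCU ∧ tgt = "unknown") :
    (((pvNeighbors r c rows cols).filter
        (fun pos => (PySem.Dict.mk (l.map (fun e => ((e.1, e.2.1), e.2.2)))).contains pos)).map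
      (fun pos =>
        if (PySem.Dict.mk (l.map (fun e => ((e.1, e.2.1), e.2.2)))).getD pos "" == tgt then (1 : Int) else 0)).sum
      = (l.map (fun e => cf rows cols e (r, c))).sum := by
  set ml := l.map (fun e => ((e.1, e.2.1), e.2.2)) with hml
  set d := PySem.Dict.mk ml with hd
  rw [PySem.List.sum_map_ite_one_zero, List.countP_filter, pv_neighbors_eq, List.countP_filter]
  have hstep : ∀ q, ((d.getD q "" == tgt) && d.contains q && pvInb rows cols q)
      = (pvInb rows cols q && (d.get? q == some tgt)) := by
    intro q
    rw [← pv_lookup_eq]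
    cases hc : d.contains q <;> cases hg : d.getD q "" == tgt <;> cases hi : pvInb rows cols q <;> simp [hc, hg, hi]
  rw [List.countP_congr (fun q _ => by rw [hstep q]), pv_countP_flip ml hK _ (pv_nbrs4_nodup (r, c))]
  have hright : (l.map (fun e => cf rows cols e (r, c))).sum
      = (ml.countP (fun kv => pvInb rows cols kv.1 && (kv.2 == tgt) && decide (kv.1 ∈ pvNbrs4 (r, c))) : Int) := by
    have hcl : ∀ e : Int × Int × String, cf rows cols e (r, c)
        = if (decide (e.2.2 = tgt) && pvInb rows cols (e.1, e.2.1) && decide ((e.1, e.2.1) ∈ pvNbrs4 (r, c))) = true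
          then (1 : Int) else 0 := by
      intro e
      rcases hcf with ⟨rfl, rfl⟩ | ⟨rfl, rfl⟩ <;>
      · simp only [pvCL, pvCU, pv_nbrs4_symm, Bool.and_eq_true, decide_eq_true_eq]
        split_ifs <;> simp_all
    rw [List.map_congr_left (fun e _ => hcl e), PySem.List.sum_map_ite_one_zero]
    rw [hml, List.countP_map]
    congr 1
    apply List.countP_congr
    intro e _
    simp only [Function.comp]
    cases h1 : decide (e.2.2 = tgt) <;> cases h2 : pvInb rows cols (e.1, e.2.1) <;>
      simp_all
  rw [hright]

lemma pv_main : ∀ (board_grid : List String) (statuses : List (Int × Int × String)), Pre_numbered_walls_feasible_py board_grid statuses → numbered_walls_feasible_py board_grid statuses = numbered_walls_feasible_py_alt board_grid statuses := by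
  intro bg st hPre
  obtain ⟨hne, hlen, hnd⟩ := hPre
  unfold numbered_walls_feasible_py numbered_walls_feasible_py_alt
  cases h0 : PySem.List.pyGet? bg 0 with
  | none => rfl
  | some row0 =>
  dsimp only []
  set R : Int := (bg.length : Int) with hR
  set C : Int := PySem.Str.len row0 with hC
  have hK : ((st.map (fun e => ((e.1, e.2.1), e.2.2))).map Prod.fst).Nodup := by
    simpa [List.map_map, Function.comp] using hnd
  have hhead : bg.headI = row0 := by
    cases bg with
    | nil => exact absurd rfl hne
    | cons a l => simpa [PySem.List.pyGet?_zero] using h0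
  have hchar : ∀ r c : Int, 0 ≤ r → r < R → 0 ≤ c → c < C →
      ∃ s ch, PySem.List.pyGet? bg r = some s ∧ PySem.Str.pyGet? s c = some ch := by
    intro r c h1 h2 h3 h4
    rw [hR] at h2
    have hr : PySem.List.pyGet? bg r = some bg[r.toNat] :=
      PySem.List.pyGet?_eq_some_getElem bg h1 h2
    have hmem : bg[r.toNat] ∈ bg := List.getElem_mem _
    have hlen2 : row0.length ≤ bg[r.toNat].length := hhead ▸ hlen _ hmem
    have h4' : c < (bg[r.toNat].toList.length : Int) := by
      rw [hC, PySem.Str.len_eq] at h4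
      have e1 : (String.toList row0).length = row0.length := String.length_toList
      have e2 : (String.toList bg[r.toNat]).length = bg[r.toNat].length := String.length_toList
      omega
    refine ⟨bg[r.toNat], (bg[r.toNat].toList)[c.toNat], hr, ?_⟩
    rw [PySem.Str.pyGet?_eq, PySem.Chars.pyGet?_eq_listPyGet?]
    exact PySem.List.pyGet?_eq_some_getElem _ h3 h4'
  -- lookup formulas for walls
  have hRnodup := pv_nodup_keys_register bg R C
  have hWnodup := pv_nodup_keys_scatter R C st _ hRnodup
  have hWget : ∀ p : Int × Int,
      (pvScatter R C st (pvRegister bg R C)).get? p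
        = if (0 ≤ p.1 ∧ p.1 < R ∧ 0 ≤ p.2 ∧ p.2 < C) ∧ pvDigitAt bg p.1 p.2 = true
          then some (pvClue bg p.1 p.2,
                     0 + (st.map (fun e => pvCL R C e p)).sum,
                     0 + (st.map (fun e => pvCU R C e p)).sum)
          else none := by
    intro p
    rw [pv_scatter_get?, pv_register_get? bg R C p]
    split_ifs with h
    · rfl
    · rfl
  apply pv_bool_eq
  rw [List.all_eq_true, List.all_eq_true]
  simp only [List.all_eq_true, PySem.List.mem_pyRange_one, PySem.Dict.values, List.mem_map]
  constructor
  · -- A feasible → every wall entry passes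
    rintro hA v ⟨⟨k, e⟩, hmemi, rfl⟩
    have hget : (pvScatter R C st (pvRegister bg R C)).get? k = some e :=
      PySem.Dict.get?_of_mem_items _ hmemi hWnodup
    rw [hWget k] at hget
    split_ifs at hget with hcond
    · obtain ⟨⟨hk1, hk2, hk3, hk4⟩, hdig⟩ := hcond
      obtain ⟨s, ch, hs, hc⟩ := hchar k.1 k.2 hk1 hk2 hk3 hk4
      have hc2 : PySem.List.pyGet? s.toList k.2 = some ch := by simpa using hc
      have hchat : pvCharAt bg k.1 k.2 = some ch := by simp [pvCharAt, hs, hc2]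
      have hdig' : PySem.Chars.isdigit ch = true := by
        rw [pvDigitAt, hchat] at hdig; exact hdig
      have hAk := hA k.1 ⟨hk1, hk2⟩ k.2 ⟨hk3, hk4⟩
      simp only [pvCellOk, hs, hc, hdig', if_true, pv_ofStr_digit ch hdig'] at hAk
      have hclue : pvClue bg k.1 k.2 = (ch.toNat : Int) - 48 := by
        simp [pvClue, hchat, pv_ofStr_digit ch hdig']
      have hcl := pv_count_eq R C st hK k.1 k.2 "lamp" pvCL (Or.inl ⟨rfl, rfl⟩)
      have hcu := pv_count_eq R C st hK k.1 k.2 "unknown" pvCU (Or.inr ⟨rfl, rfl⟩)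
      rw [hcl, hcu] at hAk
      simp only [Prod.mk.eta] at hAk
      injection hget with hget
      subst hget
      simp only [hclue]
      split_ifs at hAk with hx1 hx2
      simp only [zero_add]
      simp [hx1, hx2]
  · -- every wall entry passes → A feasible
    intro hB r hr c hc
    obtain ⟨s, ch, hs, hc'⟩ := hchar r c hr.1 hr.2 hc.1 hc.2
    have hc2 : PySem.List.pyGet? s.toList c = some ch := by simpa using hc'
    have hchat : pvCharAt bg r c = some ch := by simp [pvCharAt, hs, hc2]
    by_cases hdig : PySem.Chars.isdigit ch = true
    · simp only [pvCellOk, hs, hc', hdig, if_true, pv_ofStr_digit ch hdig]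
      have hdig2 : pvDigitAt bg r c = true := by rw [pvDigitAt, hchat]; exact hdig
      have hget : (pvScatter R C st (pvRegister bg R C)).get? (r, c)
          = some (pvClue bg r c,
                  0 + (st.map (fun e => pvCL R C e (r, c))).sum,
                  0 + (st.map (fun e => pvCU R C e (r, c))).sum) := by
        rw [hWget (r, c)]
        exact if_pos ⟨⟨hr.1, hr.2, hc.1, hc.2⟩, hdig2⟩
      have hmemi := PySem.Dict.mem_items_of_get?_eq_some _ hget
      have hpass := hB _ ⟨_, hmemi, rfl⟩
      have hclue : pvClue bg r c = (ch.toNat : Int) - 48 := by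
        simp [pvClue, hchat, pv_ofStr_digit ch hdig]
      rw [hclue] at hpass
      simp only [Bool.not_eq_eq_eq_not, Bool.not_true, Bool.or_eq_false_iff,
        decide_eq_false_iff_not, not_lt] at hpass
      have hcl := pv_count_eq R C st hK r c "lamp" pvCL (Or.inl ⟨rfl, rfl⟩)
      have hcu := pv_count_eq R C st hK r c "unknown" pvCU (Or.inr ⟨rfl, rfl⟩)
      rw [hcl, hcu]
      rw [if_neg (by omega), if_neg (by omega)]
    · simp only [pvCellOk, hs, hc']
      rw [if_neg hdig]

-- ===== VERDICT (by name: the statement is the Claim_ definition above) =====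
theorem numbered_walls_feasible_py_spec : Claim_equal_numbered_walls_feasible_py := by
  intro board_grid statuses _ hPre
  unfold Spec_numbered_walls_feasible_py
  exact pv_main board_grid statuses hPre
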